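-- pv_equiv track=rewrite | github.com/jaspreetjk20/Round1B | chkmain.py | cluster_coordinates
-- ===== SOURCE A (Python) =====
-- def cluster_coordinates(coords, tolerance=50):
--     """Cluster coordinates within tolerance"""
--     coords = sorted(set(coords))
--     clusters = []
--     current_cluster = [coords[0]]
--
--     for coord in coords[1:]:
--         if coord - current_cluster[-1] <= tolerance:
--             current_cluster.append(coord)
--         else:
--             clusters.append(current_cluster)
--             current_cluster = [coord]
--
--     clusters.append(current_cluster)
--     return clusters
-- ===== SOURCE B (Python) =====
-- def cluster_coordinates(coords, tolerance=50):
--     """Cluster coordinates within tolerance"""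
--     cs = sorted(set(coords))
--     n = len(cs)
--     breaks = [i for i in range(1, n) if cs[i] - cs[i - 1] > tolerance]
--     bounds = [0] + breaks + [n]
--     return [cs[a:b] for a, b in zip(bounds, bounds[1:])]
-- ===== Notes on version B (the rewrite author's own statement) =====
-- stated objective: alternative
-- what changed: Replaces the stateful running-cluster accumulator loop with a two-phase decomposition: first build the table of break indices where the gap exceeds tolerance, then cut the sorted unique list into clusters by slicing between consecutive bounds.
import Mathlib
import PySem

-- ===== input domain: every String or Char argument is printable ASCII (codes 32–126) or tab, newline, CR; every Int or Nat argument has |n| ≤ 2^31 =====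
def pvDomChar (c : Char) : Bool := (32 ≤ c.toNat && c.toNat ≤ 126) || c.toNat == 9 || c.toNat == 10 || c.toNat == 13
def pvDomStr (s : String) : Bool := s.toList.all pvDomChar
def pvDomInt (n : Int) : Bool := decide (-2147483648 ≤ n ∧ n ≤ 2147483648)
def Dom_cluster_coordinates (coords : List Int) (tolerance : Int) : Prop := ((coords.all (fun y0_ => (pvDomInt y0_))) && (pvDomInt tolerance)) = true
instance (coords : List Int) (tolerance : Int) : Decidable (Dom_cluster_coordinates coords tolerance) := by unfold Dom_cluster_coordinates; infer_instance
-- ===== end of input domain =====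

-- B changes the decomposition: a break-index table plus slicing replaces A's running-cluster loop;
-- equivalence of the return values is proved on nonempty inputs (A raises IndexError on []).

-- ===== PORT A =====
-- the 'for coord in coords[1:]' loop with state (clusters, current_cluster)
def pvLoopA (tolerance : Int) : List (List Int) → List Int → List Int → List (List Int)
  | clusters, cur, [] => clusters ++ [cur]
  | clusters, cur, c :: rest =>
      if c - PySem.List.pyGetD cur (-1) 0 ≤ tolerance then
        pvLoopA tolerance clusters (cur ++ [c]) rest
      else
        pvLoopA tolerance (clusters ++ [cur]) [c] rest

def cluster_coordinates (coords : List Int) (tolerance : Int) : List (List Int) :=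
  match PySem.List.sorted (PySem.Set.ofList coords) (fun x => x) false with
  | [] => []   -- Python raises IndexError (coords[0]) here; excluded by Pre_
  | x :: rest => pvLoopA tolerance [] [x] rest

-- ===== PORT B =====
-- the break-index comprehension '[i for i in range(1, n) if cs[i] - cs[i-1] > tolerance]'
def pvBreaksB (tolerance : Int) (cs : List Int) : List Int :=
  (PySem.List.pyRange 1 (PySem.List.len cs) 1).filter
    (fun i => decide (PySem.List.pyGetD cs i 0 - PySem.List.pyGetD cs (i - 1) 0 > tolerance))

def cluster_coordinates_alt (coords : List Int) (tolerance : Int) : List (List Int) :=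
  let cs := PySem.List.sorted (PySem.Set.ofList coords) (fun x => x) false
  let n : Int := PySem.List.len cs
  let breaks := pvBreaksB tolerance cs
  let bounds := [0] ++ breaks ++ [n]
  (bounds.zip (PySem.List.slice bounds (some 1) none)).map
    (fun ab => PySem.List.slice cs (some ab.1) (some ab.2))

-- ===== PRECONDITION & SPEC =====
-- Pre_ excludes only the empty list, on which A raises IndexError (coords[0] of an empty sorted set).
def Pre_cluster_coordinates (coords : List Int) (tolerance : Int) : Prop := coords ≠ []
instance (coords : List Int) (tolerance : Int) : Decidable (Pre_cluster_coordinates coords tolerance) := by unfold Pre_cluster_coordinates; infer_instance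
def pvWitness_cluster_coordinates : List Int × Int := ([1, 60, 70], 50)
def Spec_cluster_coordinates (coords : List Int) (tolerance : Int) (out : List (List Int)) : Prop := out = cluster_coordinates_alt coords tolerance
instance (coords : List Int) (tolerance : Int) (out : List (List Int)) : Decidable (Spec_cluster_coordinates coords tolerance out) := by unfold Spec_cluster_coordinates; infer_instance

-- ===== CLAIM (what is proved, stated in full; the proofs are below) =====
def Claim_equal_cluster_coordinates : Prop := ∀ (coords : List Int) (tolerance : Int), Dom_cluster_coordinates coords tolerance → Pre_cluster_coordinates coords tolerance → Spec_cluster_coordinates coords tolerance (cluster_coordinates coords tolerance)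

-- ===== LEMMAS AND PROOFS =====

-- common reference value: gap-chunking of x :: rest as (first chunk, later chunks)
def pvChunks (tolerance : Int) (x : Int) : List Int → List Int × List (List Int)
  | [] => ([x], [])
  | y :: ys =>
      let p := pvChunks tolerance y ys
      if y - x ≤ tolerance then (x :: p.1, p.2) else ([x], p.1 :: p.2)

theorem pvLoopA_eq_chunks (tolerance : Int) :
    ∀ (rest : List Int) (clusters : List (List Int)) (pre : List Int) (v : Int),
      pvLoopA tolerance clusters (pre ++ [v]) rest =
        clusters ++ ((pre ++ (pvChunks tolerance v rest).1) :: (pvChunks tolerance v rest).2) := by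
  intro rest
  induction rest with
  | nil => intro clusters pre v; simp [pvLoopA, pvChunks]
  | cons c rest ih =>
      intro clusters pre v
      simp only [pvLoopA, PySem.List.pyGetD_neg_one_append_singleton, pvChunks]
      by_cases h : c - v ≤ tolerance
      · rw [if_pos h, if_pos h, ih clusters (pre ++ [v]) c]
        simp
      · rw [if_neg h, if_neg h]
        have := ih (clusters ++ [pre ++ [v]]) [] c
        simpa using this

-- B-side helpers for the proof
def pvZipFrom (a : Int) : List Int → List (Int × Int)
  | [] => []
  | b :: bs => (a, b) :: pvZipFrom b bs

theorem pv_zip_eq_zipFrom : ∀ (bs : List Int) (a : Int), (a :: bs).zip bs = pvZipFrom a bs := by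
  intro bs
  induction bs with
  | nil => intro a; rfl
  | cons b bs ih => intro a; simp [List.zip, pvZipFrom, ← ih b]

def pvSliceChunks (cs : List Int) (a : Int) (bs : List Int) : List (List Int) :=
  (pvZipFrom a bs).map (fun ab => PySem.List.slice cs (some ab.1) (some ab.2))

theorem pv_slice_cons_succ (x : Int) (cs : List Int) (a b : Int) (ha : 0 ≤ a) (hb : 0 ≤ b) :
    PySem.List.slice (x :: cs) (some (a + 1)) (some (b + 1)) = PySem.List.slice cs (some a) (some b) := by
  rw [PySem.List.slice_toNat _ (by omega) (by omega), PySem.List.slice_toNat _ ha hb]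
  have h1 : (a + 1).toNat = a.toNat + 1 := by omega
  have h2 : (b + 1).toNat = b.toNat + 1 := by omega
  rw [h1, h2]
  simp [List.drop_succ_cons]

theorem pv_slice_zero_succ (x : Int) (cs : List Int) (b : Int) (hb : 0 ≤ b) :
    PySem.List.slice (x :: cs) (some 0) (some (b + 1)) = x :: PySem.List.slice cs (some 0) (some b) := by
  rw [PySem.List.slice_toNat _ (by omega) (by omega), PySem.List.slice_toNat _ le_rfl hb]
  have h2 : (b + 1).toNat = b.toNat + 1 := by omega
  simp [h2]

theorem pvSliceChunks_shift (x : Int) (cs : List Int) :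
    ∀ (bs : List Int) (a : Int), 0 ≤ a → (∀ b ∈ bs, 0 ≤ b) →
      pvSliceChunks (x :: cs) (a + 1) (bs.map (· + 1)) = pvSliceChunks cs a bs := by
  intro bs
  induction bs with
  | nil => intro a _ _; rfl
  | cons b bs ih =>
      intro a ha hmem
      have hb : 0 ≤ b := hmem b (by simp)
      simp only [List.map_cons, pvSliceChunks, pvZipFrom, List.map]
      rw [pv_slice_cons_succ x cs a b ha hb]
      have := ih b hb (fun c hc => hmem c (by simp [hc]))
      simpa [pvSliceChunks] using this

-- breaks of x :: y :: ys in terms of breaks of y :: ys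
theorem pv_range_shift (a b : Int) :
    PySem.List.pyRange (a + 1) (b + 1) 1 = (PySem.List.pyRange a b 1).map (· + 1) := by
  rw [PySem.List.pyRange_one, PySem.List.pyRange_one]
  have : (b + 1 - (a + 1)) = b - a := by ring
  rw [this, List.map_map]
  exact List.map_congr_left (fun k _ => by simp; ring)

theorem pvGetD_cons_shift (x : Int) (cs : List Int) (i : Int) (h0 : 0 ≤ i) (h1 : i < (cs.length : Int)) :
    PySem.List.pyGetD (x :: cs) (i + 1) 0 = PySem.List.pyGetD cs i 0 := by
  rw [PySem.List.pyGetD_eq_getElem _ _ (by omega) (by simp; omega),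
      PySem.List.pyGetD_eq_getElem _ _ h0 h1]
  have h : (i + 1).toNat = i.toNat + 1 := by omega
  simp [h]

theorem pvBreaksB_cons (tolerance x y : Int) (ys : List Int) :
    pvBreaksB tolerance (x :: y :: ys) =
      (if y - x > tolerance then [1] else []) ++ (pvBreaksB tolerance (y :: ys)).map (· + 1) := by
  unfold pvBreaksB
  have hlen : PySem.List.len (x :: y :: ys) = ((ys.length : Int) + 1) + 1 := by
    simp [PySem.List.len_eq]
  have hlen' : PySem.List.len (y :: ys) = (ys.length : Int) + 1 := by
    simp [PySem.List.len_eq]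
  rw [hlen, hlen',
      PySem.List.pyRange_one_append 1 2 ((ys.length : Int) + 1 + 1) (by omega) (by omega),
      List.filter_append,
      show (2 : Int) = 1 + 1 from rfl, PySem.List.pyRange_one_singleton,
      pv_range_shift 1 ((ys.length : Int) + 1), List.filter_map]
  refine congrArg₂ (· ++ ·) ?_ ?_
  · -- the [1] part
    have e1 : PySem.List.pyGetD (x :: y :: ys) 1 0 = y := by
      rw [show (1 : Int) = 0 + 1 from rfl,
          pvGetD_cons_shift x (y :: ys) 0 le_rfl (by simp), PySem.List.pyGetD_zero_cons]
    have e0 : PySem.List.pyGetD (x :: y :: ys) (1 - 1) 0 = x := by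
      norm_num [PySem.List.pyGetD_zero_cons]
    simp only [List.filter, e1, e0]
    by_cases h : y - x > tolerance <;> simp [h]
  · -- the shifted part
    refine congrArg _ (List.filter_congr ?_)
    intro i hi
    have hmem := (PySem.List.mem_pyRange_one).1 hi
    simp only [Function.comp]
    have g2 : PySem.List.pyGetD (x :: y :: ys) (i + 1) 0 = PySem.List.pyGetD (y :: ys) i 0 := by
      apply pvGetD_cons_shift; omega; simp; omega
    have g1 : PySem.List.pyGetD (x :: y :: ys) (i + 1 - 1) 0 = PySem.List.pyGetD (y :: ys) (i - 1) 0 := by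
      rw [show i + 1 - 1 = (i - 1) + 1 by ring]
      apply pvGetD_cons_shift; omega; simp; omega
    rw [g1, g2]

theorem pv_breaks_nonneg (tolerance : Int) (cs : List Int) :
    ∀ b ∈ pvBreaksB tolerance cs, 0 ≤ b := by
  intro b hb
  have := ((PySem.List.mem_pyRange_one).1 (List.mem_of_mem_filter hb)).1
  omega

theorem pvSliceChunks_cons (cs : List Int) (a b : Int) (bs : List Int) :
    pvSliceChunks cs a (b :: bs) =
      PySem.List.slice cs (some a) (some b) :: pvSliceChunks cs b bs := rfl

theorem pvSliceChunks_eq_chunks (tolerance : Int) :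
    ∀ (rest : List Int) (x : Int),
      pvSliceChunks (x :: rest) 0 (pvBreaksB tolerance (x :: rest) ++ [PySem.List.len (x :: rest)]) =
        (pvChunks tolerance x rest).1 :: (pvChunks tolerance x rest).2 := by
  intro rest
  induction rest with
  | nil =>
      intro x
      have hb : pvBreaksB tolerance [x] = [] := by
        unfold pvBreaksB
        rw [show PySem.List.len [x] = 1 by simp [PySem.List.len_eq],
            PySem.List.pyRange_one_eq_nil le_rfl]
        rfl
      rw [hb]
      simp only [List.nil_append, pvSliceChunks_cons, pvChunks]
      rw [show PySem.List.len [x] = 0 + 1 by simp [PySem.List.len_eq],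
          pv_slice_zero_succ x [] 0 le_rfl]
      rfl
  | cons y ys ih =>
      intro x
      rw [pvBreaksB_cons]
      have hnnB := pv_breaks_nonneg tolerance (y :: ys)
      have hl' : (0 : Int) ≤ PySem.List.len (y :: ys) := by simp [PySem.List.len_eq]; positivity
      have hnn : ∀ b ∈ pvBreaksB tolerance (y :: ys) ++ [PySem.List.len (y :: ys)], 0 ≤ b := by
        intro b hb
        rcases List.mem_append.1 hb with h | h
        · exact hnnB b h
        · simp at h; omega
      have hlen : PySem.List.len (x :: y :: ys) = PySem.List.len (y :: ys) + 1 := by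
        simp [PySem.List.len_eq]
      have hmap : (pvBreaksB tolerance (y :: ys)).map (· + 1) ++ [PySem.List.len (x :: y :: ys)] =
          (pvBreaksB tolerance (y :: ys) ++ [PySem.List.len (y :: ys)]).map (· + 1) := by
        rw [hlen]; simp
      by_cases h : y - x > tolerance
      · rw [if_pos h]
        rw [List.append_assoc, List.singleton_append, hmap, pvSliceChunks_cons]
        have hshift := pvSliceChunks_shift x (y :: ys)
            (pvBreaksB tolerance (y :: ys) ++ [PySem.List.len (y :: ys)]) 0 le_rfl hnn
        rw [show (0 : Int) + 1 = 1 from rfl] at hshift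
        rw [hshift, ih y]
        rw [show (1 : Int) = 0 + 1 from rfl, pv_slice_zero_succ x (y :: ys) 0 le_rfl]
        have : PySem.List.slice (y :: ys) (some 0) (some 0) = [] := by
          rw [PySem.List.slice_toNat _ le_rfl le_rfl]; simp
        rw [this]
        simp only [pvChunks]
        rw [if_neg (by omega)]
      · rw [if_neg h, List.nil_append, hmap]
        obtain ⟨c, t, hct⟩ :=
          List.exists_cons_of_ne_nil
            (show pvBreaksB tolerance (y :: ys) ++ [PySem.List.len (y :: ys)] ≠ [] by simp)
        have ihy := ih y
        rw [hct, pvSliceChunks_cons] at ihy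
        have hc : 0 ≤ c := hnn c (by rw [hct]; exact List.mem_cons_self ..)
        have ht : ∀ b ∈ t, 0 ≤ b := fun b hb => hnn b (by rw [hct]; exact List.mem_cons_of_mem _ hb)
        rw [hct, List.map_cons, pvSliceChunks_cons, pv_slice_zero_succ x (y :: ys) c hc,
            pvSliceChunks_shift x (y :: ys) t c hc ht]
        simp only [pvChunks]
        rw [if_pos (by omega)]
        obtain ⟨h1, h2⟩ := List.cons.injEq _ _ _ _ ▸ ihy
        rw [← h1, ← h2]

theorem cluster_coordinates_spec : Claim_equal_cluster_coordinates := by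
  intro coords tolerance _ hpre
  unfold Spec_cluster_coordinates cluster_coordinates cluster_coordinates_alt
  obtain ⟨c0, cr, hc⟩ := List.exists_cons_of_ne_nil hpre
  have hset : PySem.Set.ofList coords ≠ [] := by
    intro hnil
    have : c0 ∈ PySem.Set.ofList coords := (PySem.Set.mem_ofList coords c0).2 (by rw [hc]; simp)
    rw [hnil] at this; exact absurd this (List.not_mem_nil)
  have hsorted : PySem.List.sorted (PySem.Set.ofList coords) (fun x => x) false ≠ [] := by
    intro hnil
    exact hset ((PySem.List.sorted_eq_nil_iff _ _ _).1 hnil)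
  obtain ⟨x, rest, hxr⟩ := List.exists_cons_of_ne_nil hsorted
  rw [hxr]
  change pvLoopA tolerance [] [x] rest =
    List.map
      (fun ab => PySem.List.slice (x :: rest) (some ab.1) (some ab.2))
      (([0] ++ pvBreaksB tolerance (x :: rest) ++ [PySem.List.len (x :: rest)]).zip
        (PySem.List.slice ([0] ++ pvBreaksB tolerance (x :: rest) ++ [PySem.List.len (x :: rest)])
          (some 1) none))
  rw [show pvLoopA tolerance [] [x] rest = pvLoopA tolerance [] ([] ++ [x]) rest from rfl,
      pvLoopA_eq_chunks]
  simp only [PySem.List.slice_from_one, List.nil_append, List.singleton_append]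
  change (pvChunks tolerance x rest).1 :: (pvChunks tolerance x rest).2 =
    List.map (fun ab => PySem.List.slice (x :: rest) (some ab.1) (some ab.2))
      ((0 :: (pvBreaksB tolerance (x :: rest) ++ [PySem.List.len (x :: rest)])).zip
        (pvBreaksB tolerance (x :: rest) ++ [PySem.List.len (x :: rest)]))
  rw [pv_zip_eq_zipFrom (pvBreaksB tolerance (x :: rest) ++ [PySem.List.len (x :: rest)]) 0]
  exact (pvSliceChunks_eq_chunks tolerance rest x).symm
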